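-- pv_equiv track=rewrite | github.com/1yardie/iptv | sync_buddylive_to_tv_channels.py | parse_m3u_blocks
-- ===== SOURCE A (Python) =====
-- def parse_m3u_blocks(text: str) -> list[tuple[str, list[str]]]:
--     """Parse M3U into (display_name, block_lines). Block = EXTINF + optional # lines + URL line."""
--     lines = text.splitlines()
--     blocks = []
--     i = 0
--     while i < len(lines):
--         line = lines[i]
--         if line.strip().startswith("#EXTINF"):
--             last_comma = line.rfind(",")
--             name = (line[last_comma + 1 :].strip() if last_comma >= 0 else "").strip()
--             block = [line]
--             i += 1
--             while i < len(lines) and not lines[i].strip().startswith("http"):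
--                 block.append(lines[i])
--                 i += 1
--             if i < len(lines):
--                 block.append(lines[i])
--                 i += 1
--             blocks.append((name, block))
--         else:
--             i += 1
--     return blocks
-- ===== SOURCE B (Python) =====
-- def parse_m3u_blocks(text: str) -> list[tuple[str, list[str]]]:
--     """Parse M3U into (display_name, block_lines) by locating block boundaries and slicing."""
--     lines = text.splitlines()
--     n = len(lines)
--     blocks = []
--     pos = 0
--     while pos < n:
--         start = next((j for j in range(pos, n) if lines[j].strip().startswith("#EXTINF")), n)
--         if start == n:
--             break
--         end = next((j for j in range(start + 1, n) if lines[j].strip().startswith("http")), n)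
--         header = lines[start]
--         c = header.rfind(",")
--         name = header[c + 1:].strip() if c >= 0 else ""
--         blocks.append((name, lines[start:end + 1]))
--         pos = end + 1
--     return blocks
-- ===== Notes on version B (the rewrite author's own statement) =====
-- stated objective: alternative
-- what changed: Replaces A's mutable index-walking outer/inner while loops with boundary search: each iteration locates the next #EXTINF header and the following http line, then emits the block as a single list slice.
import Mathlib
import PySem

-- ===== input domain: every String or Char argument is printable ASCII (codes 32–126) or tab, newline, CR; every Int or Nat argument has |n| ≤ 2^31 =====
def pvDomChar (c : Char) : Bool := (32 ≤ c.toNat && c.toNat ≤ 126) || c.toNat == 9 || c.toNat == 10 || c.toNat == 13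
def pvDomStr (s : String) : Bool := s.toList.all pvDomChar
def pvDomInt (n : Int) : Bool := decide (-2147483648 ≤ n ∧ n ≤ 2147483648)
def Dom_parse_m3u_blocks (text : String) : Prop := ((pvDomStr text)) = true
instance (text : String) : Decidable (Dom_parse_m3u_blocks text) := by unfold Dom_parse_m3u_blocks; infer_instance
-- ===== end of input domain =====

-- B replaces A's index-walking nested while loops by boundary search (find next #EXTINF, find
-- next http line, emit one slice per block); same return value, similar cost (objective: alternative).

-- line.strip().startswith("#EXTINF") / .startswith("http"), used by both Pythons verbatim
def pvExtinf (l : String) : Bool := PySem.Str.startswith (PySem.Str.strip l) "#EXTINF"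
def pvHttp (l : String) : Bool := PySem.Str.startswith (PySem.Str.strip l) "http"

-- ===== PORT A =====
-- inner 'while i < len(lines) and not lines[i].strip().startswith("http")' loop of A
def pvInnerA (lines : List String) (i : Nat) (block : List String) : List String × Nat :=
  if i < lines.length then
    if ¬ pvHttp (lines.getD i "") then pvInnerA lines (i + 1) (block ++ [lines.getD i ""])
    else (block, i)
  else (block, i)
termination_by lines.length - i

theorem pvInnerA_ge (lines : List String) (i : Nat) (block : List String) :
    i ≤ (pvInnerA lines i block).2 := by
  fun_induction pvInnerA lines i block with
  | case1 _ _ _ _ ih => omega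
  | case2 => simp
  | case3 => simp

-- outer 'while i < len(lines)' loop of A
def pvOuterA (lines : List String) (i : Nat) (blocks : List (String × List String)) :
    List (String × List String) :=
  if hi : i < lines.length then
    let line := lines.getD i ""
    if pvExtinf line then
      let last_comma : Int := PySem.Str.rfind line ","
      let name := PySem.Str.strip
        (if last_comma ≥ 0 then PySem.Str.strip (PySem.Str.slice line (some (last_comma + 1)) none)
         else "")
      match hr : pvInnerA lines (i + 1) [line] with
      | (block, j) =>
        if hj : j < lines.length then
          pvOuterA lines (j + 1) (blocks ++ [(name, block ++ [lines.getD j ""])])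
        else
          pvOuterA lines j (blocks ++ [(name, block)])
    else pvOuterA lines (i + 1) blocks
  else blocks
termination_by lines.length - i
decreasing_by
  · have h := pvInnerA_ge lines (i + 1) [line]; rw [hr] at h; simp at h; omega
  · have h := pvInnerA_ge lines (i + 1) [line]; rw [hr] at h; simp at h; omega
  · omega

def parse_m3u_blocks (text : String) : List (String × List String) :=
  pvOuterA (PySem.Str.splitlines text) 0 []

-- ===== PORT B =====
-- next((j for j in range(pos, n) if p(lines[j])), n)
def pvFindFrom (p : String → Bool) (lines : List String) (j : Nat) : Nat :=
  if j < lines.length then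
    if p (lines.getD j "") then j else pvFindFrom p lines (j + 1)
  else lines.length
termination_by lines.length - j

theorem pvFindFrom_le (p : String → Bool) (lines : List String) (j : Nat) :
    pvFindFrom p lines j ≤ lines.length := by
  fun_induction pvFindFrom p lines j with
  | case1 => omega
  | case2 _ _ _ ih => exact ih
  | case3 => omega

theorem pvFindFrom_ge (p : String → Bool) (lines : List String) (j : Nat) (h : j ≤ lines.length) :
    j ≤ pvFindFrom p lines j := by
  fun_induction pvFindFrom p lines j with
  | case1 => omega
  | case2 _ _ _ ih => omega
  | case3 => omega

-- B's 'while pos < n' loop: locate block boundaries, emit one slice per block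
def pvOuterB (lines : List String) (pos : Nat) (blocks : List (String × List String)) :
    List (String × List String) :=
  if hp : pos < lines.length then
    let start := pvFindFrom pvExtinf lines pos
    if hs : start = lines.length then blocks
    else
      let e := pvFindFrom pvHttp lines (start + 1)
      let header := lines.getD start ""
      let c : Int := PySem.Str.rfind header ","
      let name := if c ≥ 0 then PySem.Str.strip (PySem.Str.slice header (some (c + 1)) none) else ""
      pvOuterB lines (e + 1)
        (blocks ++ [(name, PySem.List.slice lines (some (start : Int)) (some ((e : Int) + 1)))])
  else blocks
termination_by lines.length - pos
decreasing_by
  have hsl := pvFindFrom_le pvExtinf lines pos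
  have hsg := pvFindFrom_ge pvExtinf lines pos (by omega)
  have heg := pvFindFrom_ge pvHttp lines (pvFindFrom pvExtinf lines pos + 1) (by omega)
  omega

def parse_m3u_blocks_alt (text : String) : List (String × List String) :=
  pvOuterB (PySem.Str.splitlines text) 0 []

-- ===== PRECONDITION & SPEC =====
def Spec_parse_m3u_blocks (text : String) (out : List (String × List String)) : Prop := out = parse_m3u_blocks_alt text
instance (text : String) (out : List (String × List String)) : Decidable (Spec_parse_m3u_blocks text out) := by unfold Spec_parse_m3u_blocks; infer_instance

-- ===== CLAIM (what is proved, stated in full; the proofs are below) =====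
def Claim_equal_parse_m3u_blocks : Prop := ∀ (text : String), Dom_parse_m3u_blocks text → Spec_parse_m3u_blocks text (parse_m3u_blocks text)

-- ===== LEMMAS AND PROOFS =====

theorem dw_idem (p : Char → Bool) (l : List Char) :
    List.dropWhile p (List.dropWhile p l) = List.dropWhile p l := by
  cases h : List.dropWhile p l with
  | nil => simp
  | cons a t =>
    have : ¬ p a := by
      have := List.head_dropWhile_not p (l := l) (by simp [h])
      simpa [h] using this
    simp [this]

theorem strip_chars_idem (p : Char → Bool) (l : List Char) :
    (List.dropWhile p ((List.dropWhile p ((List.dropWhile p ((List.dropWhile p l).reverse)).reverse)).reverse)).reverse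
    = (List.dropWhile p ((List.dropWhile p l).reverse)).reverse := by
  set y := List.dropWhile p ((List.dropWhile p l).reverse) with hy
  have hm : List.dropWhile p y.reverse = y.reverse := by
    cases hmm : y.reverse with
    | nil => simp
    | cons a t =>
      have hpref : y.reverse <+: List.dropWhile p l := by
        have : y <:+ (List.dropWhile p l).reverse := List.dropWhile_suffix p
        simpa using this.reverse
      have : ¬ p a := by
        rcases hpref with ⟨r, hr⟩
        rw [hmm] at hr
        have := List.head_dropWhile_not p (l := l) (by simp [← hr])
        simp [← hr] at this ⊢
        exact this
      simp [this]
  rw [hm]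
  simp only [List.reverse_reverse]
  rw [hy, dw_idem]

theorem strip_strip (s : String) :
    PySem.Str.strip (PySem.Str.strip s) = PySem.Str.strip s := by
  simp [PySem.Str.strip, PySem.Chars.strip, PySem.Chars.lstrip, PySem.Chars.rstrip]
  rw [strip_chars_idem]

-- A's inner loop collects exactly the lines up to B's boundary search result
theorem pvInnerA_eq (lines : List String) (j : Nat) (block : List String) (hj : j ≤ lines.length) :
    pvInnerA lines j block =
      (block ++ (lines.drop j).take (pvFindFrom pvHttp lines j - j), pvFindFrom pvHttp lines j) := by
  fun_induction pvInnerA lines j block with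
  | case1 j block hlt hp ih =>
    rw [List.getD_eq_getElem lines "" hlt] at hp
    have hf : pvFindFrom pvHttp lines j = pvFindFrom pvHttp lines (j + 1) := by
      rw [pvFindFrom]; simp [hlt, List.getD_eq_getElem lines "" hlt, hp]
    have hge : j + 1 ≤ pvFindFrom pvHttp lines (j + 1) :=
      pvFindFrom_ge pvHttp lines (j + 1) (by omega)
    rw [ih (by omega), hf]
    obtain ⟨k, hk⟩ : ∃ k, pvFindFrom pvHttp lines (j + 1) - j = k + 1 :=
      ⟨pvFindFrom pvHttp lines (j + 1) - j - 1, by omega⟩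
    have hdrop : lines.drop j = lines.getD j "" :: lines.drop (j + 1) := by
      rw [List.getD_eq_getElem lines "" hlt]
      exact List.drop_eq_getElem_cons hlt
    rw [List.getD_eq_getElem lines "" hlt] at ih ⊢
    rw [hdrop, hk, List.take_succ_cons]
    have : pvFindFrom pvHttp lines (j + 1) - (j + 1) = k := by omega
    rw [this]
    simp [List.getElem?_eq_getElem hlt]
  | case2 j block hlt hp =>
    rw [List.getD_eq_getElem lines "" hlt] at hp
    simp only [not_not] at hp
    have hf : pvFindFrom pvHttp lines j = j := by
      rw [pvFindFrom]; simp [hlt, List.getD_eq_getElem lines "" hlt, hp]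
    simp [hf]
  | case3 j block hlt =>
    have hj' : j = lines.length := by omega
    subst hj'
    have hf : pvFindFrom pvHttp lines lines.length = lines.length := by
      rw [pvFindFrom]; simp
    simp [hf]

theorem pvOuterB_skip (lines : List String) (i : Nat) (blocks : List (String × List String))
    (hi : i < lines.length) (hx : ¬ pvExtinf (lines.getD i "")) :
    pvOuterB lines i blocks = pvOuterB lines (i + 1) blocks := by
  rw [List.getD_eq_getElem lines "" hi] at hx
  have hstep : pvFindFrom pvExtinf lines i = pvFindFrom pvExtinf lines (i + 1) := by
    rw [pvFindFrom]; simp [hi, List.getD_eq_getElem lines "" hi, hx]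
  by_cases h2 : i + 1 < lines.length
  · rw [pvOuterB, pvOuterB]
    simp only [hi, h2, dif_pos]
    rw [hstep]
  · have hlen : pvFindFrom pvExtinf lines (i + 1) = lines.length := by
      rw [pvFindFrom]; simp [h2]
    rw [pvOuterB, pvOuterB]
    simp only [hi, h2, dif_pos, dif_neg]
    simp [hstep, hlen]

theorem strip_empty : PySem.Str.strip "" = "" := by decide

theorem name_outer_strip (P : Prop) [Decidable P] (x : String) :
    PySem.Str.strip (if P then PySem.Str.strip x else "") = (if P then PySem.Str.strip x else "") := by
  split_ifs
  · exact strip_strip x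
  · exact strip_empty

theorem pvFindFrom_here (p : String → Bool) (lines : List String) (i : Nat)
    (hi : i < lines.length) (hp : p (lines.getD i "")) : pvFindFrom p lines i = i := by
  rw [List.getD_eq_getElem lines "" hi] at hp
  rw [pvFindFrom]; simp [hi, List.getD_eq_getElem lines "" hi, hp]

theorem seg_take (lines : List String) (i e : Nat) (hi : i < lines.length)
    (hie : i + 1 ≤ e) (he : e < lines.length) :
    [lines[i]] ++ (List.take (e - (i + 1)) (List.drop (i + 1) lines)) ++ [lines[e]]
      = List.take (e + 1 - i) (List.drop i lines) := by
  rw [List.drop_eq_getElem_cons hi]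
  obtain ⟨k, hk⟩ : ∃ k, e + 1 - i = k + 1 := ⟨e - i, by omega⟩
  rw [hk, List.take_succ_cons]
  have hk2 : k = (e - (i + 1)) + 1 := by omega
  rw [hk2, List.take_add_one]
  have : (List.drop (i + 1) lines)[e - (i + 1)]? = some lines[e] := by
    rw [List.getElem?_drop]
    have : i + 1 + (e - (i + 1)) = e := by omega
    rw [this, List.getElem?_eq_getElem he]
  rw [this]
  simp

theorem seg_take_all (lines : List String) (i : Nat) (hi : i < lines.length) :
    [lines[i]] ++ List.take (lines.length - (i + 1)) (List.drop (i + 1) lines)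
      = List.take (lines.length + 1 - i) (List.drop i lines) := by
  rw [List.take_of_length_le (by simp), List.take_of_length_le (by simp; omega)]
  rw [List.drop_eq_getElem_cons hi]
  simp

theorem pvOuter_eq (lines : List String) (i : Nat) (blocks : List (String × List String)) :
    pvOuterA lines i blocks = pvOuterB lines i blocks := by
  fun_induction pvOuterA lines i blocks with
  | case1 i blocks hi line hextinf last_comma name block j hr hj ih =>
    rw [ih]
    have hIE := pvInnerA_eq lines (i + 1) [line] (by omega)
    rw [hr] at hIE
    have hb : block = [line] ++ List.take (pvFindFrom pvHttp lines (i + 1) - (i + 1)) (List.drop (i + 1) lines) := by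
      have := congrArg Prod.fst hIE; simpa using this
    have hjE : j = pvFindFrom pvHttp lines (i + 1) := by
      have := congrArg Prod.snd hIE; simpa using this
    have hge : i + 1 ≤ j := by rw [hjE]; exact pvFindFrom_ge pvHttp lines (i + 1) (by omega)
    conv_rhs => rw [pvOuterB]
    simp only [hi, dif_pos]
    rw [pvFindFrom_here pvExtinf lines i hi hextinf]
    rw [dif_neg (by omega : ¬ i = lines.length)]
    rw [← hjE]
    have hpair : (name, block ++ [lines.getD j ""]) =
        ((if PySem.Str.rfind line "," ≥ 0 then
            PySem.Str.strip (PySem.Str.slice line (some (PySem.Str.rfind line "," + 1)) none)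
          else ""),
         PySem.List.slice lines (some (i : Int)) (some ((j : Int) + 1))) := by
      rw [Prod.mk.injEq]
      refine ⟨name_outer_strip _ _, ?_⟩
      rw [hb]
      have hcast : ((j : Int) + 1) = (((j + 1 : Nat)) : Int) := by push_cast; ring
      rw [hcast, PySem.List.slice_natCast]
      rw [List.getD_eq_getElem lines "" hj]
      have hline : line = lines[i] := List.getD_eq_getElem lines "" hi
      rw [hline, ← hjE]
      simpa using seg_take lines i j hi hge hj
    exact congrArg (fun p => pvOuterB lines (j + 1) (blocks ++ [p])) hpair
  | case2 i blocks hi line hextinf last_comma name block j hr hj ih =>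
    rw [ih]
    have hIE := pvInnerA_eq lines (i + 1) [line] (by omega)
    rw [hr] at hIE
    have hb : block = [line] ++ List.take (pvFindFrom pvHttp lines (i + 1) - (i + 1)) (List.drop (i + 1) lines) := by
      have := congrArg Prod.fst hIE; simpa using this
    have hjE : j = pvFindFrom pvHttp lines (i + 1) := by
      have := congrArg Prod.snd hIE; simpa using this
    have hle : j ≤ lines.length := by rw [hjE]; exact pvFindFrom_le pvHttp lines (i + 1)
    have hjlen : j = lines.length := by omega
    conv_rhs => rw [pvOuterB]
    simp only [hi, dif_pos]
    rw [pvFindFrom_here pvExtinf lines i hi hextinf]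
    rw [dif_neg (by omega : ¬ i = lines.length)]
    rw [← hjE]
    have hpair : (name, block) =
        ((if PySem.Str.rfind line "," ≥ 0 then
            PySem.Str.strip (PySem.Str.slice line (some (PySem.Str.rfind line "," + 1)) none)
          else ""),
         PySem.List.slice lines (some (i : Int)) (some ((j : Int) + 1))) := by
      rw [Prod.mk.injEq]
      refine ⟨name_outer_strip _ _, ?_⟩
      rw [hb, ← hjE]
      have hcast : ((j : Int) + 1) = (((j + 1 : Nat)) : Int) := by push_cast; ring
      rw [hcast, PySem.List.slice_natCast]
      have hline : line = lines[i] := List.getD_eq_getElem lines "" hi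
      rw [hline, hjlen]
      simpa using seg_take_all lines i hi
    rw [show pvOuterB lines j (blocks ++ [(name, block)]) =
          pvOuterB lines (j + 1) (blocks ++ [(name, block)]) from by
      conv_lhs => rw [pvOuterB]
      conv_rhs => rw [pvOuterB]
      rw [dif_neg (by omega : ¬ j < lines.length), dif_neg (by omega : ¬ j + 1 < lines.length)]]
    exact congrArg (fun p => pvOuterB lines (j + 1) (blocks ++ [p])) hpair
  | case3 i blocks hi line hextinf ih =>
    rw [ih, ← pvOuterB_skip lines i blocks hi hextinf]
  | case4 i blocks hi =>
    conv_rhs => rw [pvOuterB]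
    simp [hi]

-- ===== VERDICT (by name: the statement is the Claim_ definition above) =====
theorem parse_m3u_blocks_spec : Claim_equal_parse_m3u_blocks := by
  intro text _
  unfold Spec_parse_m3u_blocks parse_m3u_blocks parse_m3u_blocks_alt
  exact pvOuter_eq _ 0 []
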